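-- pv_equiv track=rewrite | github.com/LucasB19/kindle-parse-highlights-master | kindle.py | organize_highlights
-- ===== SOURCE A (Python) =====
-- def organize_highlights(lines):
--     books = {}
--     title = ""
--     for line in lines:
--         if line and not line.startswith("- Your Highlight") and line != "==========":
--             if title:
--                 books[title] = books.get(title, []) + [line]
--             else:
--                 title = line
--         elif line == "==========":
--             title = ""
--     return books
-- ===== SOURCE B (Python) =====
-- def organize_highlights(lines):
--     # Split into blocks on the "==========" separator, then process each block:
--     # first qualifying line is the title, the rest are its highlights.
--     segments = []
--     block = []
--     for line in lines:
--         if line == "==========":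
--             segments.append(block)
--             block = []
--         else:
--             block.append(line)
--     segments.append(block)
--     books = {}
--     for seg in segments:
--         entries = [l for l in seg if l and not l.startswith("- Your Highlight")]
--         if len(entries) > 1:
--             title = entries[0]
--             books[title] = books.get(title, []) + entries[1:]
--     return books
-- ===== Notes on version B (the rewrite author's own statement) =====
-- stated objective: faster
-- what changed: B splits the input into separator-delimited blocks and makes one batch dict insertion of each block's filtered tail under its head title, instead of A's line-by-line state machine that rebuilds the title's whole list by concatenation for every single highlight line.
import Mathlib
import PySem

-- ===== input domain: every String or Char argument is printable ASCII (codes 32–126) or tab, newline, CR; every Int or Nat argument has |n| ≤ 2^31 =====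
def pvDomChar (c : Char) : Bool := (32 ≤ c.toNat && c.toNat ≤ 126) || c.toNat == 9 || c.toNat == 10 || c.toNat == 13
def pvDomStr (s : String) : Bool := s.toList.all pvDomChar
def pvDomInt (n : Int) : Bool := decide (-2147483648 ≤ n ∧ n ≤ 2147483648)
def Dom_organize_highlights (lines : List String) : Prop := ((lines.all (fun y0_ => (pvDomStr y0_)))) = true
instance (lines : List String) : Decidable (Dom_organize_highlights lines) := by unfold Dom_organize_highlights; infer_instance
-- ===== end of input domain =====

-- B splits the input into separator-delimited blocks and batch-inserts each block's highlights under its title, instead of A's line-by-line state machine; proved to return the same dict.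


-- ===== PORT A =====
def orgAloop (books : PySem.Dict String (List String)) (title : String) :
    List String → PySem.Dict String (List String)
  | [] => books
  | line :: rest =>
    if line ≠ "" ∧ ¬ (PySem.Str.startswith line "- Your Highlight" = true) ∧ line ≠ "==========" then
      if title ≠ "" then
        orgAloop (books.insert title (books.getD title [] ++ [line])) title rest
      else
        orgAloop books line rest
    else if line = "==========" then
      orgAloop books "" rest
    else
      orgAloop books title rest

def organize_highlights (lines : List String) : List (String × List String) :=
  (orgAloop PySem.Dict.empty "" lines).items

-- ===== PORT B =====
def pvQual (line : String) : Bool :=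
  !(line == "") && !(PySem.Str.startswith line "- Your Highlight")

def splitBlocks (block : List String) : List String → List (List String)
  | [] => [block]
  | line :: rest =>
    if line = "==========" then block :: splitBlocks [] rest
    else splitBlocks (block ++ [line]) rest

def procSeg (books : PySem.Dict String (List String)) (seg : List String) :
    PySem.Dict String (List String) :=
  let entries := seg.filter pvQual
  if 1 < entries.length then
    books.insert (entries.headD "") (books.getD (entries.headD "") [] ++ entries.tail)
  else books

def organize_highlights_alt (lines : List String) : List (String × List String) :=
  ((splitBlocks [] lines).foldl procSeg PySem.Dict.empty).items

-- ===== PRECONDITION & SPEC =====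
def Spec_organize_highlights (lines : List String) (out : List (String × List String)) : Prop := out = organize_highlights_alt lines
instance (lines : List String) (out : List (String × List String)) : Decidable (Spec_organize_highlights lines out) := by unfold Spec_organize_highlights; infer_instance

-- ===== CLAIM (what is proved, stated in full; the proofs are below) =====
def Claim_equal_organize_highlights : Prop := ∀ (lines : List String), Dom_organize_highlights lines → Spec_organize_highlights lines (organize_highlights lines)

-- ===== LEMMAS AND PROOFS =====

-- A's title variable as a function of the current block
def titleOf (block : List String) : String := (block.filter pvQual).headD ""

-- A's books as a function of the current block: one-by-one inserts of the tail entries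
def procPartial (b : PySem.Dict String (List String)) (block : List String) :
    PySem.Dict String (List String) :=
  match block.filter pvQual with
  | [] => b
  | t :: r => r.foldl (fun d l => d.insert t (d.getD t [] ++ [l])) b

theorem foldl_insert_append (t : String) :
    ∀ (r : List String) (b : PySem.Dict String (List String)),
      r.foldl (fun d l => d.insert t (d.getD t [] ++ [l])) b =
        if r = [] then b else b.insert t (b.getD t [] ++ r) := by
  intro r
  induction r with
  | nil => intro b; simp
  | cons x xs ih =>
    intro b
    simp only [List.foldl_cons, ih]
    cases xs with
    | nil => simp
    | cons y ys =>
      simp only [reduceCtorEq, if_false]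
      rw [PySem.Dict.getD_insert_self, PySem.Dict.insert_insert_self]
      simp

theorem procSeg_eq_procPartial (b : PySem.Dict String (List String)) (seg : List String) :
    procSeg b seg = procPartial b seg := by
  unfold procSeg procPartial
  cases hf : seg.filter pvQual with
  | nil => simp
  | cons t r =>
    cases r with
    | nil => simp
    | cons x xs =>
      simp [foldl_insert_append]
      cases xs with
      | nil => simp
      | cons y ys => rw [if_neg (by simp), PySem.Dict.insert_insert_self]

theorem filter_head_ne_empty {block : List String} {t : String} {r : List String}
    (h : block.filter pvQual = t :: r) : t ≠ "" := by
  have ht : t ∈ block.filter pvQual := h ▸ List.mem_cons_self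
  have := (List.mem_filter.mp ht).2
  unfold pvQual at this
  simp only [Bool.and_eq_true, Bool.not_eq_true', beq_eq_false_iff_ne] at this
  exact this.1

theorem orgAloop_eq_foldl :
    ∀ (ls block : List String) (b : PySem.Dict String (List String)),
      orgAloop (procPartial b block) (titleOf block) ls =
        (splitBlocks block ls).foldl procSeg b := by
  intro ls
  induction ls with
  | nil =>
    intro block b
    simp [orgAloop, splitBlocks, procSeg_eq_procPartial]
  | cons line rest ih =>
    intro block b
    by_cases hsep : line = "=========="
    · subst hsep
      rw [show orgAloop (procPartial b block) (titleOf block) ("==========" :: rest) =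
            orgAloop (procPartial b block) "" rest by simp [orgAloop]]
      rw [show splitBlocks block ("==========" :: rest) = block :: splitBlocks [] rest by
            simp [splitBlocks]]
      rw [List.foldl_cons, procSeg_eq_procPartial]
      have := ih [] (procPartial b block)
      simpa [procPartial, titleOf] using this
    · by_cases hq : pvQual line = true
      · have hq' := hq
        unfold pvQual at hq'
        simp only [Bool.and_eq_true, Bool.not_eq_true', beq_eq_false_iff_ne] at hq'
        have hne1 : line ≠ "" := hq'.1
        have hcond : line ≠ "" ∧ ¬ (PySem.Str.startswith line "- Your Highlight" = true) ∧
            line ≠ "==========" := ⟨hne1, by simp only [hq'.2]; simp, hsep⟩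
        have hsplit : splitBlocks block (line :: rest) = splitBlocks (block ++ [line]) rest := by
          simp [splitBlocks, hsep]
        have hfilt : (block ++ [line]).filter pvQual = block.filter pvQual ++ [line] := by
          simp [List.filter_append, hq]
        cases hf : block.filter pvQual with
        | nil =>
          have ht0 : titleOf block = "" := by simp [titleOf, hf]
          have hA : orgAloop (procPartial b block) (titleOf block) (line :: rest) =
              orgAloop (procPartial b block) line rest := by
            simp only [orgAloop, ht0]
            rw [if_pos hcond]
            simp
          rw [hA, hsplit, ← ih (block ++ [line]) b]
          congr 1
          · simp only [procPartial, hf, hfilt]; simp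
          · unfold titleOf; rw [hfilt, hf]; simp
        | cons t r =>
          have ht : t ≠ "" := filter_head_ne_empty hf
          have htO : titleOf block = t := by simp [titleOf, hf]
          have hA : orgAloop (procPartial b block) (titleOf block) (line :: rest) =
              orgAloop ((procPartial b block).insert t
                ((procPartial b block).getD t [] ++ [line])) t rest := by
            simp only [orgAloop, htO]
            rw [if_pos hcond, if_pos ht]
          rw [hA, hsplit, ← ih (block ++ [line]) b]
          congr 1
          · simp only [procPartial, hf, hfilt]
            simp [List.foldl_append]
          · unfold titleOf; rw [hfilt, hf]; simp
      · have hA : orgAloop (procPartial b block) (titleOf block) (line :: rest) =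
            orgAloop (procPartial b block) (titleOf block) rest := by
          have hncond : ¬ (line ≠ "" ∧ ¬ (PySem.Str.startswith line "- Your Highlight" = true) ∧
              line ≠ "==========") := by
            intro h
            apply hq
            unfold pvQual
            have hsw : PySem.Str.startswith line "- Your Highlight" = false := by
              cases hb : PySem.Str.startswith line "- Your Highlight"
              · rfl
              · exact absurd hb h.2.1
            simp only [hsw]
            simp [h.1]
          simp only [orgAloop]
          rw [if_neg hncond, if_neg hsep]
        have hfilt : (block ++ [line]).filter pvQual = block.filter pvQual := by
          simp [List.filter_append, hq]
        have hsplit : splitBlocks block (line :: rest) = splitBlocks (block ++ [line]) rest := by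
          simp [splitBlocks, hsep]
        rw [hA, hsplit, ← ih (block ++ [line]) b]
        congr 1
        · unfold procPartial; rw [hfilt]
        · unfold titleOf; rw [hfilt]

-- ===== VERDICT (by name: the statement is the Claim_ definition above) =====
theorem organize_highlights_spec : Claim_equal_organize_highlights := by
  intro lines _
  unfold Spec_organize_highlights organize_highlights organize_highlights_alt
  have := orgAloop_eq_foldl lines [] PySem.Dict.empty
  rw [show procPartial PySem.Dict.empty [] = PySem.Dict.empty from rfl,
      show titleOf [] = "" from rfl] at this
  rw [this]
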